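-- pv_equiv track=rewrite | github.com/thanhbinhnd2002/Asymmetric_competitive_network_dynamics_model | Normal_Total_Support.py | compute_total_support
-- ===== SOURCE A (Python) =====
-- def compute_total_support(alpha_id, states):
--     support = 0
--     for node_id in range(len(states)):
--         if node_id == alpha_id:
--             continue
--         if states[node_id] > 0:
--             support += 1
--         elif states[node_id] < 0:
--             support -= 1
--     return support
-- ===== SOURCE B (Python) =====
-- def compute_total_support(alpha_id, states):
--     # Stage 1: drop alpha's entry by slicing (only when its index is in range),
--     # so the counting stages never look at indices at all.
--     if isinstance(alpha_id, int) and 0 <= alpha_id < len(states):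
--         others = states[:alpha_id] + states[alpha_id + 1:]
--     else:
--         others = states
--     # Stage 2/3: filter-and-count positives and negatives, return the difference.
--     pos = len([s for s in others if s > 0])
--     neg = len([s for s in others if s < 0])
--     return pos - neg
-- ===== Notes on version B (the rewrite author's own statement) =====
-- stated objective: alternative
-- what changed: Instead of one indexed loop that skips alpha and updates a signed accumulator, B first removes alpha's entry by list slicing (when its index is in range) and then counts positives and negatives with two separate filter passes, returning the difference of the two counts.
import Mathlib
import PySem

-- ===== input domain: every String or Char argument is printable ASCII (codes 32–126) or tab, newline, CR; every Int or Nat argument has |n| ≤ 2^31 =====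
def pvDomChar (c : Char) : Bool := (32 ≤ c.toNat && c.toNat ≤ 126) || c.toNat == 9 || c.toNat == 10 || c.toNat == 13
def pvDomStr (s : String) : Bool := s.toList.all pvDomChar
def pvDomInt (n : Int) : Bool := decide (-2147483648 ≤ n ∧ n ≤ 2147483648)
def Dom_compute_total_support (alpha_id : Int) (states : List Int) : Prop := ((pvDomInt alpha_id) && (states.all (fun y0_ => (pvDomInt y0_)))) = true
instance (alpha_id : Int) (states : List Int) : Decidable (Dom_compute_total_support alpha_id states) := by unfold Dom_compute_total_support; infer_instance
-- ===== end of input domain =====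

-- ===== PORT A =====
-- A loops node_id over range(len(states)) and reads states[node_id]; ported as a
-- fold over states.zipIdx, which carries exactly those (value, index) pairs.
def compute_total_support (alpha_id : Int) (states : List Int) : Int :=
  (states.zipIdx).foldl
    (fun support p =>
      if (p.2 : Int) = alpha_id then support
      else if p.1 > 0 then support + 1
      else if p.1 < 0 then support - 1
      else support) 0

-- ===== PORT B =====
-- B removes alpha's entry by slicing, then counts positives and negatives with
-- two filter passes ('len([s for s in others if …])') and returns pos - neg.
-- 'isinstance(alpha_id, int)' is always true under the type convention.
def compute_total_support_alt (alpha_id : Int) (states : List Int) : Int :=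
  let others :=
    if 0 ≤ alpha_id ∧ alpha_id < (states.length : Int) then
      PySem.List.slice states none (some alpha_id)
        ++ PySem.List.slice states (some (alpha_id + 1)) none
    else states
  let pos := (others.filter (fun s => s > 0)).length
  let neg := (others.filter (fun s => s < 0)).length
  (pos : Int) - (neg : Int)

-- ===== PRECONDITION & SPEC =====
def Spec_compute_total_support (alpha_id : Int) (states : List Int) (out : Int) : Prop := out = compute_total_support_alt alpha_id states
instance (alpha_id : Int) (states : List Int) (out : Int) : Decidable (Spec_compute_total_support alpha_id states out) := by unfold Spec_compute_total_support; infer_instance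

-- ===== CLAIM (what is proved, stated in full; the proofs are below) =====
def Claim_equal_compute_total_support : Prop := ∀ (alpha_id : Int) (states : List Int), Dom_compute_total_support alpha_id states → Spec_compute_total_support alpha_id states (compute_total_support alpha_id states)

-- ===== LEMMAS AND PROOFS =====

def pvSgn (s : Int) : Int := if s > 0 then 1 else if s < 0 then -1 else 0

-- A's loop over zipIdx starting at k, with a general accumulator: it adds the
-- sign sum and omits the sign of the element whose index equals alpha_id.
theorem pvA_loop (a : Int) (states : List Int) (k : Nat) (acc : Int) :
    (states.zipIdx k).foldl
      (fun support p =>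
        if (p.2 : Int) = a then support
        else if p.1 > 0 then support + 1
        else if p.1 < 0 then support - 1
        else support) acc
      = acc + (states.map pvSgn).sum
          - (if (k : Int) ≤ a ∧ a < (k : Int) + states.length
             then pvSgn (states.getD (a - k).toNat 0) else 0) := by
  induction states generalizing k acc with
  | nil =>
    simp only [List.zipIdx_nil, List.foldl_nil, List.map_nil, List.sum_nil, List.length_nil,
      Nat.cast_zero, add_zero]
    rw [if_neg (by omega)]; ring
  | cons x xs ih =>
    simp only [List.zipIdx_cons, List.foldl_cons, List.map_cons, List.sum_cons,
      List.length_cons]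
    have hstep : (if (k : Int) = a then acc
        else if x > 0 then acc + 1 else if x < 0 then acc - 1 else acc)
        = acc + (if (k : Int) = a then 0 else pvSgn x) := by
      unfold pvSgn; split_ifs <;> ring
    rw [hstep, ih]
    push_cast
    by_cases hk : (k : Int) = a
    · rw [if_pos hk, if_neg (by omega), if_pos (by constructor <;> omega)]
      have h0 : (a - (k : Int)).toNat = 0 := by omega
      rw [h0, List.getD_cons_zero]
      ring
    · rw [if_neg hk]
      by_cases hin : ((k : Int) + 1) ≤ a ∧ a < ((k : Int) + 1) + xs.length
      · rw [if_pos hin, if_pos (by constructor <;> omega)]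
        have hidx : (a - (k : Int)).toNat = (a - ((k : Int) + 1)).toNat + 1 := by omega
        rw [hidx, List.getD_cons_succ]
        ring
      · rw [if_neg hin, if_neg (by omega)]
        ring

-- The difference of B's two filter counts over any list is its sign sum.
theorem pvCounts (l : List Int) :
    ((l.filter (fun s => s > 0)).length : Int) - ((l.filter (fun s => s < 0)).length : Int)
      = (l.map pvSgn).sum := by
  induction l with
  | nil => simp
  | cons x xs ih =>
    simp only [List.filter_cons, List.map_cons, List.sum_cons]
    rw [← ih]
    by_cases h1 : x > 0 <;> by_cases h2 : x < 0
    · omega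
    · simp only [pvSgn, h1, h2, decide_true, decide_false, if_true, if_false,
        Bool.false_eq_true, List.length_cons]
      push_cast; ring
    · simp only [pvSgn, h1, h2, decide_true, decide_false, if_true, if_false,
        Bool.false_eq_true, List.length_cons]
      push_cast; ring
    · simp only [pvSgn, h1, h2, decide_false, if_false, Bool.false_eq_true]
      ring

-- Sign sum of the list with index n removed (n < length).
theorem pvSum_remove (states : List Int) (n : Nat) (h : n < states.length) :
    ((states.take n ++ states.drop (n + 1)).map pvSgn).sum
      = (states.map pvSgn).sum - pvSgn (states.getD n 0) := by
  induction states generalizing n with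
  | nil => simp at h
  | cons x xs ih =>
    cases n with
    | zero => simp
    | succ m =>
      have hm : m < xs.length := by simpa using h
      simp only [List.take_succ_cons, List.drop_succ_cons, List.cons_append,
        List.map_cons, List.sum_cons, List.getD_cons_succ, ih m hm]
      ring

theorem compute_total_support_eq (a : Int) (states : List Int) :
    compute_total_support a states = compute_total_support_alt a states := by
  unfold compute_total_support compute_total_support_alt
  rw [pvA_loop a states 0 0]
  simp only [Nat.cast_zero, zero_add, sub_zero]
  by_cases h : 0 ≤ a ∧ a < (states.length : Int)
  · rw [if_pos (by omega), if_pos h]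
    rw [PySem.List.slice_to states h.1, PySem.List.slice_from states (by omega)]
    have hlen : a.toNat < states.length := by omega
    have htn : (a + 1).toNat = a.toNat + 1 := by omega
    rw [htn]
    rw [pvCounts, pvSum_remove states a.toNat hlen]
  · rw [if_neg (by omega), if_neg h, pvCounts]
    ring

-- ===== VERDICT (by name: the statement is the Claim_ definition above) =====
theorem compute_total_support_spec : Claim_equal_compute_total_support := by
  intro a states _
  unfold Spec_compute_total_support
  exact compute_total_support_eq a states
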